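-- pv_equiv track=rewrite | github.com/ksb8320/Technical-interview | 20200218_swea_algorithm/토너먼트 카드게임.py | check
-- ===== SOURCE A (Python) =====
-- def check(start,end,card_num):
--     if start==end:
--         return start # 빠져나오는 조건
--     else:
--         v1=check(start,(start+end)//2,card_num) # 절반 나눈 첫번째 그룹, 재귀
--         v2=check(((start+end)//2)+1,end,card_num) # 절반 나눈 두번재 그룹, 재귀
--
--         if card_num[v1]=="1" and card_num[v2]=="2":
--             return v2
--         elif card_num[v1]=="1" and card_num[v2]=="3":
--             return v1
--         elif card_num[v1]=="2" and card_num[v2]=="1":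
--             return v1
--         elif card_num[v1]=="2" and card_num[v2]=="3":
--             return v2
--         elif card_num[v1]=="3" and card_num[v2]=="1":
--             return v2
--         elif card_num[v1]=="3" and card_num[v2]=="2":
--             return v1
--         elif card_num[v1]==card_num[v2]: # 무승부
--             return v1 # 누가 이겼는지를 알기위해 인덱스 출력
-- ===== SOURCE B (Python) =====
-- def check(start, end, card_num):
--     # Iterative explicit-stack version of the tournament: same (s+e)//2 split tree,
--     # if-chain collapsed to the (int(a)-int(b)) % 3 == 1 rule.
--     tasks = [(False, start, end)]
--     results = []
--     while tasks:
--         is_combine, s, e = tasks.pop()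
--         if is_combine:
--             v2 = results.pop()
--             v1 = results.pop()
--             a = card_num[v1]
--             b = card_num[v2]
--             if a == b:
--                 results.append(v1)
--             elif (int(a) - int(b)) % 3 == 1:
--                 results.append(v1)
--             else:
--                 results.append(v2)
--         elif s == e:
--             results.append(s)
--         else:
--             m = (s + e) // 2
--             tasks.append((True, 0, 0))
--             tasks.append((False, m + 1, e))
--             tasks.append((False, s, m))
--     return results[-1]
-- ===== Notes on version B (the rewrite author's own statement) =====
-- stated objective: alternative
-- what changed: Replaces A's divide-and-conquer recursion with an iterative explicit work-stack (same (s+e)//2 bracket tree) and collapses the six-branch if-chain into the single arithmetic rule (int(a)-int(b)) % 3 == 1.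
-- outside the precondition, e.g. on check(0, 1, ['x', '1']): A returns None, B raises ValueError
import Mathlib
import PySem

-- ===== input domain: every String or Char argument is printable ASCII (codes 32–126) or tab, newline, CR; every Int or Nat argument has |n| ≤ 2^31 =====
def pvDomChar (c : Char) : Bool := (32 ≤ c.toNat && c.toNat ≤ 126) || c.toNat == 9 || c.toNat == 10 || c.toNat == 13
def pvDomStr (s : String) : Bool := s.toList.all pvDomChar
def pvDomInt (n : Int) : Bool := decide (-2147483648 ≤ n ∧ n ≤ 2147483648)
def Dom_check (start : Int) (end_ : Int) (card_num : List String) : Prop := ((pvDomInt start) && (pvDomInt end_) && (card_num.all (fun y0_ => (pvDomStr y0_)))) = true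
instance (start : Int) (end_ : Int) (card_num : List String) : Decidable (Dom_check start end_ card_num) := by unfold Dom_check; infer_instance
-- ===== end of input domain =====

-- B replaces A's recursion by an explicit work-stack (same (s+e)//2 bracket tree) and collapses
-- the six-way if-chain to the (int(a)-int(b)) % 3 == 1 rule; objective: alternative decomposition.

-- midpoint bounds, cited by both ports' decreasing_by
theorem pvMidBounds {s e : Int} (h : s < e) :
    s ≤ PySem.Int.floordiv (s + e) 2 ∧ PySem.Int.floordiv (s + e) 2 < e := by
  constructor
  · rw [PySem.Int.le_floordiv_iff_mul_le (by omega : (0:Int) < 2)]; omega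
  · rw [PySem.Int.floordiv_lt_iff_lt_mul (by omega : (0:Int) < 2)]; omega

-- ===== PORT A =====
-- A's inline six-branch if-chain (card_num[v1]/card_num[v2] read first, as in Python)
def checkChain (card_num : List String) (v1 : Int) (v2 : Int) : Int :=
  match PySem.List.pyGet? card_num v1, PySem.List.pyGet? card_num v2 with
  | some a, some b =>
    if a = "1" ∧ b = "2" then v2
    else if a = "1" ∧ b = "3" then v1
    else if a = "2" ∧ b = "1" then v1
    else if a = "2" ∧ b = "3" then v2
    else if a = "3" ∧ b = "1" then v2
    else if a = "3" ∧ b = "2" then v1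
    else if a = b then v1
    else 0      -- Python falls off the if-chain and returns None (not an int); excluded by Pre_
  | _, _ => 0   -- Python raises IndexError here; excluded by Pre_

def check (start : Int) (end_ : Int) (card_num : List String) : Int :=
  if start = end_ then start
  else if h : start < end_ then
    let v1 := check start (PySem.Int.floordiv (start + end_) 2) card_num
    let v2 := check (PySem.Int.floordiv (start + end_) 2 + 1) end_ card_num
    checkChain card_num v1 v2
  else 0        -- Python recurses forever (start > end); excluded by Pre_
termination_by (end_ - start).toNat
decreasing_by
  · have := pvMidBounds h; omega
  · have := pvMidBounds h; omega

-- ===== PORT B =====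
inductive BTask
  | solve : Int → Int → BTask
  | combine : BTask
deriving DecidableEq, Repr

def bTaskWeight : BTask → Nat
  | .solve s e => 3 * (e - s).toNat + 1
  | .combine => 1

-- the combine step of Source B: a = card_num[v1]; b = card_num[v2]; tie → v1, else the %3 rule
def bCombine (card_num : List String) (v1 : Int) (v2 : Int) : Int :=
  match PySem.List.pyGet? card_num v1, PySem.List.pyGet? card_num v2 with
  | some a, some b =>
    if a = b then v1
    else if PySem.Int.mod ((PySem.Int.ofStr? a).getD 0 - (PySem.Int.ofStr? b).getD 0) 3 = 1 then v1
    else v2   -- int(·) would raise ValueError on non-int cards; those inputs are excluded by Pre_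
  | _, _ => 0 -- Python raises IndexError here; excluded by Pre_

-- the while-loop of Source B: tasks is the stack (head = top), results the value stack (head = last appended)
def checkAltLoop (card_num : List String) (tasks : List BTask) (results : List Int) : List Int :=
  match tasks with
  | [] => results
  | .combine :: rest =>
    match results with
    | v2 :: v1 :: rs => checkAltLoop card_num rest (bCombine card_num v1 v2 :: rs)
    | _ => []       -- results.pop() would raise IndexError; unreachable from check_alt's initial stack
  | .solve s e :: rest =>
    if s = e then checkAltLoop card_num rest (s :: results)
    else if h : s < e then
      checkAltLoop card_num
        (.solve s (PySem.Int.floordiv (s + e) 2) ::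
         .solve (PySem.Int.floordiv (s + e) 2 + 1) e :: .combine :: rest) results
    else checkAltLoop card_num rest results   -- Python loops forever when s > e; excluded by Pre_
termination_by (tasks.map bTaskWeight).sum
decreasing_by
  · simp only [List.map_cons, List.sum_cons, bTaskWeight]; omega
  · simp only [List.map_cons, List.sum_cons, bTaskWeight]; omega
  · have := pvMidBounds h
    simp only [List.map_cons, List.sum_cons, bTaskWeight]; omega
  · simp only [List.map_cons, List.sum_cons, bTaskWeight]; omega

def check_alt (start : Int) (end_ : Int) (card_num : List String) : Int :=
  match checkAltLoop card_num [.solve start end_] [] with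
  | r :: _ => r
  | [] => 0   -- results[-1] would raise IndexError on an empty list; unreachable

-- ===== PRECONDITION & SPEC =====
-- every card indexed during the tournament (Python indices start..end_, negative ones wrap) is "1"/"2"/"3"
def Cards123 (start : Int) (end_ : Int) (card_num : List String) : Prop :=
  ∀ i ∈ PySem.List.pyRange start (end_ + 1),
    (PySem.List.pyGet? card_num i).getD "" ∈ (["1", "2", "3"] : List String)

-- all cards indexed during the tournament are equal to each other (every meeting is a tie)
def CardsEq (start : Int) (end_ : Int) (card_num : List String) : Prop :=
  ∀ i ∈ PySem.List.pyRange start (end_ + 1), ∀ j ∈ PySem.List.pyRange start (end_ + 1),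
    (PySem.List.pyGet? card_num i).getD "" = (PySem.List.pyGet? card_num j).getD ""

-- Pre_ excludes ranges with start > end (A recurses forever: RecursionError), indices outside
-- -len..len-1 (A raises IndexError), and slices of cards on which some meeting is of two distinct
-- values not both in {"1","2","3"} (A's if-chain falls through and returns None, not an int).
def Pre_check (start : Int) (end_ : Int) (card_num : List String) : Prop :=
  start = end_ ∨
  (-(card_num.length : Int) ≤ start ∧ start < end_ ∧ end_ < card_num.length ∧
    (Cards123 start end_ card_num ∨ CardsEq start end_ card_num))
instance (start : Int) (end_ : Int) (card_num : List String) : Decidable (Pre_check start end_ card_num) := by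
  unfold Pre_check Cards123 CardsEq; infer_instance

def pvWitness_check : Int × Int × List String := (0, 2, ["1", "3", "2"])

def Spec_check (start : Int) (end_ : Int) (card_num : List String) (out : Int) : Prop := out = check_alt start end_ card_num
instance (start : Int) (end_ : Int) (card_num : List String) (out : Int) : Decidable (Spec_check start end_ card_num out) := by unfold Spec_check; infer_instance

-- ===== CLAIM (what is proved, stated in full; the proofs are below) =====
def Claim_equal_check : Prop := ∀ (start : Int) (end_ : Int) (card_num : List String), Dom_check start end_ card_num → Pre_check start end_ card_num → Spec_check start end_ card_num (check start end_ card_num)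

-- ===== LEMMAS AND PROOFS =====

theorem check_base {s e : Int} (h : s = e) (cn : List String) : check s e cn = s := by
  rw [check, if_pos h]

theorem check_step {s e : Int} (h : s < e) (cn : List String) :
    check s e cn
      = checkChain cn (check s (PySem.Int.floordiv (s + e) 2) cn)
          (check (PySem.Int.floordiv (s + e) 2 + 1) e cn) := by
  rw [check, if_neg (by omega : ¬ s = e), dif_pos h]

-- recursive twin of B's stack loop, used only by the proofs
def bRec (s : Int) (e : Int) (card_num : List String) : Int :=
  if s = e then s
  else if h : s < e then
    bCombine card_num (bRec s (PySem.Int.floordiv (s + e) 2) card_num)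
      (bRec (PySem.Int.floordiv (s + e) 2 + 1) e card_num)
  else 0
termination_by (e - s).toNat
decreasing_by
  · have := pvMidBounds h; omega
  · have := pvMidBounds h; omega

theorem bRec_base {s e : Int} (h : s = e) (cn : List String) : bRec s e cn = s := by
  rw [bRec, if_pos h]

theorem bRec_step {s e : Int} (h : s < e) (cn : List String) :
    bRec s e cn
      = bCombine cn (bRec s (PySem.Int.floordiv (s + e) 2) cn)
          (bRec (PySem.Int.floordiv (s + e) 2 + 1) e cn) := by
  rw [bRec, if_neg (by omega : ¬ s = e), dif_pos h]

theorem checkAltLoop_solve (card_num : List String) :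
    ∀ (n : Nat) (s e : Int) (rest : List BTask) (results : List Int),
      (e - s).toNat = n → s ≤ e →
      checkAltLoop card_num (.solve s e :: rest) results
        = checkAltLoop card_num rest (bRec s e card_num :: results) := by
  intro n
  induction n using Nat.strong_induction_on with
  | _ n ih =>
    intro s e rest results hn hse
    by_cases h : s = e
    · rw [checkAltLoop, if_pos h, bRec_base h, h]
    · have hlt : s < e := lt_of_le_of_ne hse h
      obtain ⟨hm1, hm2⟩ := pvMidBounds hlt
      rw [checkAltLoop, if_neg h, dif_pos hlt]
      rw [ih ((PySem.Int.floordiv (s + e) 2) - s).toNat (by omega) s _ _ _ rfl hm1]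
      rw [ih (e - (PySem.Int.floordiv (s + e) 2 + 1)).toNat (by omega) _ e _ _ rfl (by omega)]
      rw [checkAltLoop]
      rw [bRec_step hlt]

theorem check_alt_eq_bRec (s e : Int) (card_num : List String) (hse : s ≤ e) :
    check_alt s e card_num = bRec s e card_num := by
  unfold check_alt
  rw [checkAltLoop_solve card_num (e - s).toNat s e [] [] rfl hse]
  rw [checkAltLoop]

theorem cards123_mono {s e s' e' : Int} {cn : List String}
    (h : Cards123 s e cn) (h1 : s ≤ s') (h2 : e' ≤ e) : Cards123 s' e' cn := by
  intro i hi
  rw [PySem.List.mem_pyRange_one] at hi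
  exact h i (PySem.List.mem_pyRange_one.mpr (by omega))

theorem cardsEq_mono {s e s' e' : Int} {cn : List String}
    (h : CardsEq s e cn) (h1 : s ≤ s') (h2 : e' ≤ e) : CardsEq s' e' cn := by
  intro i hi j hj
  rw [PySem.List.mem_pyRange_one] at hi hj
  exact h i (PySem.List.mem_pyRange_one.mpr (by omega)) j (PySem.List.mem_pyRange_one.mpr (by omega))

theorem pvChainEq (cn : List String) (v1 : Int) (v2 : Int) (a : String) (b : String)
    (hget1 : PySem.List.pyGet? cn v1 = some a) (hget2 : PySem.List.pyGet? cn v2 = some b)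
    (hcase : (a ∈ (["1","2","3"] : List String) ∧ b ∈ (["1","2","3"] : List String)) ∨ a = b) :
    checkChain cn v1 v2 = bCombine cn v1 v2 ∧
      (checkChain cn v1 v2 = v1 ∨ checkChain cn v1 v2 = v2) := by
  rw [checkChain, bCombine]
  simp only [hget1, hget2]
  rcases hcase with ⟨ha, hb⟩ | hab
  · fin_cases ha <;> fin_cases hb <;>
      simp [show ((PySem.Int.ofStr? "1").getD 0) = 1 from by decide,
        show ((PySem.Int.ofStr? "2").getD 0) = 2 from by decide,
        show ((PySem.Int.ofStr? "3").getD 0) = 3 from by decide, PySem.Int.mod]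
  · subst hab
    have c1 : ¬ (a = "1" ∧ a = "2") := by rintro ⟨rfl, h⟩; exact absurd h (by decide)
    have c2 : ¬ (a = "1" ∧ a = "3") := by rintro ⟨rfl, h⟩; exact absurd h (by decide)
    have c3 : ¬ (a = "2" ∧ a = "1") := by rintro ⟨rfl, h⟩; exact absurd h (by decide)
    have c4 : ¬ (a = "2" ∧ a = "3") := by rintro ⟨rfl, h⟩; exact absurd h (by decide)
    have c5 : ¬ (a = "3" ∧ a = "1") := by rintro ⟨rfl, h⟩; exact absurd h (by decide)
    have c6 : ¬ (a = "3" ∧ a = "2") := by rintro ⟨rfl, h⟩; exact absurd h (by decide)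
    simp [c1, c2, c3, c4, c5, c6]

theorem check_eq_bRec (cn : List String) :
    ∀ (n : Nat) (s e : Int), (e - s).toNat = n → -(cn.length : Int) ≤ s → s ≤ e → e < cn.length →
      (Cards123 s e cn ∨ CardsEq s e cn) →
      check s e cn = bRec s e cn ∧ s ≤ check s e cn ∧ check s e cn ≤ e := by
  intro n
  induction n using Nat.strong_induction_on with
  | _ n ih =>
    intro s e hn h0 hse hlen hcards
    by_cases h : s = e
    · rw [check_base h, bRec_base h]
      omega
    · have hlt : s < e := lt_of_le_of_ne hse h
      obtain ⟨hm1, hm2⟩ := pvMidBounds hlt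
      rw [check_step hlt, bRec_step hlt]
      obtain ⟨ihv1, hv1a, hv1b⟩ :=
        ih (PySem.Int.floordiv (s + e) 2 - s).toNat (by omega) s (PySem.Int.floordiv (s + e) 2)
          rfl h0 hm1 (by omega) (by
            rcases hcards with hc | hc
            · exact Or.inl (cards123_mono hc le_rfl (by omega))
            · exact Or.inr (cardsEq_mono hc le_rfl (by omega)))
      obtain ⟨ihv2, hv2a, hv2b⟩ :=
        ih (e - (PySem.Int.floordiv (s + e) 2 + 1)).toNat (by omega)
          (PySem.Int.floordiv (s + e) 2 + 1) e rfl (by omega) (by omega) hlen (by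
            rcases hcards with hc | hc
            · exact Or.inl (cards123_mono hc (by omega) le_rfl)
            · exact Or.inr (cardsEq_mono hc (by omega) le_rfl))
      rw [← ihv1, ← ihv2]
      generalize hv1 : check s (PySem.Int.floordiv (s + e) 2) cn = v1 at hv1a hv1b ⊢
      generalize hv2 : check (PySem.Int.floordiv (s + e) 2 + 1) e cn = v2 at hv2a hv2b ⊢
      obtain ⟨a, hget1⟩ : ∃ a, PySem.List.pyGet? cn v1 = some a := by
        refine Option.ne_none_iff_exists'.mp ?_
        rw [Ne, PySem.List.pyGet?_eq_none_iff]
        intro hcon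
        exact hcon (by constructor <;> omega)
      obtain ⟨b, hget2⟩ : ∃ b, PySem.List.pyGet? cn v2 = some b := by
        refine Option.ne_none_iff_exists'.mp ?_
        rw [Ne, PySem.List.pyGet?_eq_none_iff]
        intro hcon
        exact hcon (by constructor <;> omega)
      have hcase : (a ∈ (["1","2","3"] : List String) ∧ b ∈ (["1","2","3"] : List String)) ∨ a = b := by
        rcases hcards with hc | hc
        · refine Or.inl ⟨?_, ?_⟩
          · have := hc v1 (PySem.List.mem_pyRange_one.mpr (by omega))
            rwa [hget1] at this
          · have := hc v2 (PySem.List.mem_pyRange_one.mpr (by omega))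
            rwa [hget2] at this
        · refine Or.inr ?_
          have := hc v1 (PySem.List.mem_pyRange_one.mpr (by omega))
            v2 (PySem.List.mem_pyRange_one.mpr (by omega))
          rwa [hget1, hget2] at this
      obtain ⟨heq, hval⟩ := pvChainEq cn v1 v2 a b hget1 hget2 hcase
      refine ⟨heq, ?_⟩
      rcases hval with hv | hv <;> rw [hv] <;> omega

-- ===== VERDICT (by name: the statement is the Claim_ definition above) =====
theorem check_spec : Claim_equal_check := by
  intro start end_ card_num _ hpre
  unfold Spec_check
  rcases hpre with h | ⟨h0, hlt, hlen, hcards⟩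
  · rw [check_alt_eq_bRec _ _ _ (le_of_eq h), check_base h, bRec_base h]
  · rw [check_alt_eq_bRec _ _ _ (le_of_lt hlt)]
    exact (check_eq_bRec card_num (end_ - start).toNat start end_ rfl h0 (le_of_lt hlt) hlen hcards).1
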